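-- pv_equiv track=rewrite | github.com/Zulut30/deckview-telegram-bot | hsguru_scraper.py | translate_deck_name
-- ===== SOURCE A (Python) =====
-- from typing import Dict, List, Callable, Optional, Set, Tuple
--
-- def translate_deck_name(name: str, archetypes: Dict[str, str]) -> str:
--     """Переводит название колоды с английского на русский."""
--     if not name or not archetypes:
--         return name
--
--     name_lower = name.lower().strip()
--
--     # Точное совпадение
--     if name_lower in archetypes:
--         return archetypes[name_lower]
--
--     # Частичное совпадение - ищем самый длинный подходящий архетип
--     best_match = None
--     best_length = 0
--
--     for eng, rus in archetypes.items():
--         if eng in name_lower and len(eng) > best_length: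
--             best_match = rus
--             best_length = len(eng)
--
--     if best_match:
--         return best_match
--
--     return name
-- ===== SOURCE B (Python) =====
-- def translate_deck_name(name: str, archetypes: dict) -> str:
--     """Two-phase fallback: compute the longest matching archetype length, then
--     return the translation of the first key of that length (the original name
--     stands in when that translation is empty)."""
--     if not name or not archetypes:
--         return name
--
--     name_lower = name.lower().strip()
--
--     if name_lower in archetypes:
--         return archetypes[name_lower]
--
--     best_length = max((len(k) for k in archetypes if k in name_lower), default=0)
--     if best_length == 0:
--         return name
--
--     rus = next(v for k, v in archetypes.items()
--                if len(k) == best_length and k in name_lower)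
--     return rus if rus else name
-- ===== Notes on version B (the rewrite author's own statement) =====
-- stated objective: alternative
-- what changed: A's fallback keeps a running best (translation, length) in one scan with a strict-greater update; B instead computes the maximum matching key length with max(..., default=0) and then returns the translation of the first key of that length, preserving A's tie-break (first key of maximal length) and its fallback to the original name when the matched translation is empty.
import Mathlib
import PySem

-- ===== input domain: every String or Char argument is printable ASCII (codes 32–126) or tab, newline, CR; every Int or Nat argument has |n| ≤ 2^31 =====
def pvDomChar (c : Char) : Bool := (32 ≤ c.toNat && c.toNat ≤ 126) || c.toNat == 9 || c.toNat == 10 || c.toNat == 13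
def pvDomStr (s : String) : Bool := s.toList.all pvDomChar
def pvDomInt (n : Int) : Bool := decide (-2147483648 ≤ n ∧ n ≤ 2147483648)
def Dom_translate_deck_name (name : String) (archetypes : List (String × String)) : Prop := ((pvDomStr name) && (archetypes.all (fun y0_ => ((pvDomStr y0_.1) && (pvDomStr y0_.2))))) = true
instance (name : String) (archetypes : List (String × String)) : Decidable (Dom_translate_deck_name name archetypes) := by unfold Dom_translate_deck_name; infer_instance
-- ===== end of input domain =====

-- B replaces A's running-best single scan by a two-phase fallback (max matching
-- key length, then first key of that length); objective: alternative, same cost.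

-- ===== PORT A =====
def translate_deck_name (name : String) (archetypes : List (String × String)) : String :=
  if name == "" || archetypes.isEmpty then name
  else
    let d := PySem.Dict.ofList archetypes
    let name_lower := PySem.Str.strip (PySem.Str.lower name)
    match d.get? name_lower with
    | some v => v
    | none =>
      let r := d.items.foldl
        (fun (acc : Option String × Int) kv =>
          if PySem.Str.isIn kv.1 name_lower && decide (acc.2 < PySem.Str.len kv.1)
          then (some kv.2, PySem.Str.len kv.1) else acc)
        (none, 0)
      match r.1 with
      | some best => if best == "" then name else best
      | none => name

-- ===== PORT B =====
def translate_deck_name_alt (name : String) (archetypes : List (String × String)) : String :=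
  if name == "" || archetypes.isEmpty then name
  else
    let d := PySem.Dict.ofList archetypes
    let name_lower := PySem.Str.strip (PySem.Str.lower name)
    match d.get? name_lower with
    | some v => v
    | none =>
      let best_length := PySem.List.maxD
        ((d.keys.filter (fun k => PySem.Str.isIn k name_lower)).map PySem.Str.len)
        (fun x => x) 0
      if best_length == 0 then name
      else
        match d.items.find? (fun kv =>
            PySem.Str.len kv.1 == best_length && PySem.Str.isIn kv.1 name_lower) with
        | some kv => if kv.2 == "" then name else kv.2
        | none => name  -- unreachable: best_length ≠ 0 guarantees a matching key

-- ===== PRECONDITION & SPEC =====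
def Spec_translate_deck_name (name : String) (archetypes : List (String × String)) (out : String) : Prop := out = translate_deck_name_alt name archetypes
instance (name : String) (archetypes : List (String × String)) (out : String) : Decidable (Spec_translate_deck_name name archetypes out) := by unfold Spec_translate_deck_name; infer_instance

-- ===== CLAIM (what is proved, stated in full; the proofs are below) =====
def Claim_equal_translate_deck_name : Prop := ∀ (name : String) (archetypes : List (String × String)), Dom_translate_deck_name name archetypes → Spec_translate_deck_name name archetypes (translate_deck_name name archetypes)

-- ===== LEMMAS AND PROOFS =====

lemma find?_congr_mem' {α : Type} (p q : α → Bool) (l : List α)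
    (h : ∀ x ∈ l, p x = q x) : l.find? p = l.find? q := by
  induction l with
  | nil => rfl
  | cons a t ih =>
    simp only [List.find?_cons]
    rw [h a (by simp)]
    cases hq : q a <;> simp [ih (fun x hx => h x (by simp [hx]))]

lemma exists_max_match (nl : String) (t : List (String × String))
    (hex : ∃ w ∈ t, PySem.Str.isIn w.1 nl = true) :
    ∃ x ∈ t, PySem.Str.isIn x.1 nl = true ∧
      ∀ y ∈ t, PySem.Str.isIn y.1 nl = true → PySem.Str.len y.1 ≤ PySem.Str.len x.1 := by
  induction t with
  | nil => obtain ⟨w, hw, -⟩ := hex; cases hw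
  | cons a s ih =>
    by_cases hs : ∃ v ∈ s, PySem.Str.isIn v.1 nl = true
    · obtain ⟨x, hx, hxin, hxmax⟩ := ih hs
      by_cases ha : PySem.Str.isIn a.1 nl = true ∧ PySem.Str.len x.1 < PySem.Str.len a.1
      · refine ⟨a, by simp, ha.1, fun y hy hyin => ?_⟩
        rcases List.mem_cons.mp hy with rfl | hy'
        · exact le_refl _
        · have := hxmax y hy' hyin; omega
      · refine ⟨x, List.mem_cons_of_mem _ hx, hxin, fun y hy hyin => ?_⟩
        rcases List.mem_cons.mp hy with rfl | hy'
        · by_cases hin' : PySem.Str.isIn y.1 nl = true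
          · have : ¬ PySem.Str.len x.1 < PySem.Str.len y.1 := fun hlt => ha ⟨hin', hlt⟩
            omega
          · exact absurd hyin hin'
        · exact hxmax y hy' hyin
    · obtain ⟨w, hw, hwin⟩ := hex
      have hwa : w = a := by
        rcases List.mem_cons.mp hw with rfl | hw'
        · rfl
        · exact absurd ⟨w, hw', hwin⟩ hs
      subst hwa
      refine ⟨w, by simp, hwin, fun y hy hyin => ?_⟩
      rcases List.mem_cons.mp hy with rfl | hy'
      · exact le_refl _
      · exact absurd ⟨y, hy', hyin⟩ hs

lemma fold_best_spec (nl : String) (l : List (String × String)) (b : Option String) (n : Int) :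
    l.foldl
      (fun (acc : Option String × Int) kv =>
        if PySem.Str.isIn kv.1 nl && decide (acc.2 < PySem.Str.len kv.1)
        then (some kv.2, PySem.Str.len kv.1) else acc)
      (b, n)
    = match l.find? (fun kv =>
          PySem.Str.isIn kv.1 nl && decide (n < PySem.Str.len kv.1)
          && l.all (fun kv' => !(PySem.Str.isIn kv'.1 nl)
              || decide (PySem.Str.len kv'.1 ≤ PySem.Str.len kv.1))) with
      | none => (b, n)
      | some w => (some w.2, PySem.Str.len w.1) := by
  induction l generalizing b n with
  | nil => rfl
  | cons kv t ih =>
    simp only [List.foldl_cons]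
    by_cases hin : PySem.Str.isIn kv.1 nl = true
    · by_cases hlt : n < PySem.Str.len kv.1
      · rw [if_pos (by rw [Bool.and_eq_true, decide_eq_true_eq]; exact ⟨hin, hlt⟩)]
        rw [ih]
        by_cases hdom : ∀ kv' ∈ t, PySem.Str.isIn kv'.1 nl = true → PySem.Str.len kv'.1 ≤ PySem.Str.len kv.1
        · rw [List.find?_cons_of_pos (by
            simp only [Bool.and_eq_true, decide_eq_true_eq, List.all_cons, Bool.or_eq_true,
              Bool.not_eq_true', List.all_eq_true]
            refine ⟨⟨hin, hlt⟩, Or.inr (le_refl _), fun x hx => ?_⟩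
            by_cases hxin : PySem.Str.isIn x.1 nl = true
            · exact Or.inr (hdom x hx hxin)
            · exact Or.inl (Bool.not_eq_true _ ▸ hxin))]
          have hnone : t.find? (fun kv' =>
              PySem.Str.isIn kv'.1 nl && decide (PySem.Str.len kv.1 < PySem.Str.len kv'.1)
              && t.all (fun kv'' => !(PySem.Str.isIn kv''.1 nl)
                  || decide (PySem.Str.len kv''.1 ≤ PySem.Str.len kv'.1))) = none := by
            rw [List.find?_eq_none]
            intro x hx hcontra
            simp only [Bool.and_eq_true, decide_eq_true_eq] at hcontra
            exact absurd (hdom x hx hcontra.1.1) (by omega)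
          rw [hnone]
        · have hdom' : ∃ w ∈ t, PySem.Str.isIn w.1 nl = true ∧ PySem.Str.len kv.1 < PySem.Str.len w.1 := by
            by_contra hc
            exact hdom (fun kv' h1 h2 => by by_contra h3; exact hc ⟨kv', h1, h2, by omega⟩)
          obtain ⟨w, hw, hwin, hwlt⟩ := hdom'
          rw [List.find?_cons_of_neg (by
            simp only [Bool.and_eq_true, decide_eq_true_eq, List.all_cons, Bool.or_eq_true,
              Bool.not_eq_true', List.all_eq_true]
            rintro ⟨-, -, hall⟩
            rcases hall w hw with h | h
            · exact absurd h (by simpa using hwin)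
            · omega)]
          have hfq : t.find? (fun kv' =>
                PySem.Str.isIn kv'.1 nl && decide (PySem.Str.len kv.1 < PySem.Str.len kv'.1)
                && t.all (fun kv'' => !(PySem.Str.isIn kv''.1 nl)
                    || decide (PySem.Str.len kv''.1 ≤ PySem.Str.len kv'.1)))
              = t.find? (fun kv' =>
                PySem.Str.isIn kv'.1 nl && decide (n < PySem.Str.len kv'.1)
                && (kv :: t).all (fun kv'' => !(PySem.Str.isIn kv''.1 nl)
                    || decide (PySem.Str.len kv''.1 ≤ PySem.Str.len kv'.1))) := by
            refine find?_congr_mem' _ _ t (fun x hx => ?_)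
            rw [Bool.eq_iff_iff]
            simp only [Bool.and_eq_true, decide_eq_true_eq, List.all_cons, Bool.or_eq_true,
              Bool.not_eq_true', List.all_eq_true]
            constructor
            · rintro ⟨⟨hxin, hxlt⟩, hall⟩
              exact ⟨⟨hxin, by omega⟩, Or.inr (by omega), hall⟩
            · rintro ⟨⟨hxin, hxlt⟩, -, hall⟩
              refine ⟨⟨hxin, ?_⟩, hall⟩
              rcases hall w hw with h | h
              · exact absurd h (by simpa using hwin)
              · omega
          rw [hfq]
          obtain ⟨x, hx, hxin, hxmax⟩ := exists_max_match nl t ⟨w, hw, hwin⟩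
          have hsome : t.find? (fun kv' =>
              PySem.Str.isIn kv'.1 nl && decide (n < PySem.Str.len kv'.1)
              && (kv :: t).all (fun kv'' => !(PySem.Str.isIn kv''.1 nl)
                  || decide (PySem.Str.len kv''.1 ≤ PySem.Str.len kv'.1))) ≠ none := by
            intro hnone
            rw [List.find?_eq_none] at hnone
            refine hnone x hx ?_
            simp only [Bool.and_eq_true, decide_eq_true_eq, List.all_cons, Bool.or_eq_true,
              Bool.not_eq_true', List.all_eq_true]
            have hwx := hxmax w hw hwin
            refine ⟨⟨hxin, by omega⟩, Or.inr (by omega), fun y hy => ?_⟩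
            by_cases hyin : PySem.Str.isIn y.1 nl = true
            · exact Or.inr (hxmax y hy hyin)
            · exact Or.inl (Bool.not_eq_true _ ▸ hyin)
          cases hfind : t.find? (fun kv' =>
              PySem.Str.isIn kv'.1 nl && decide (n < PySem.Str.len kv'.1)
              && (kv :: t).all (fun kv'' => !(PySem.Str.isIn kv''.1 nl)
                  || decide (PySem.Str.len kv''.1 ≤ PySem.Str.len kv'.1))) with
          | none => exact absurd hfind hsome
          | some u => rfl
      · rw [if_neg (by simp only [Bool.and_eq_true, decide_eq_true_eq]; exact fun h => hlt h.2)]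
        rw [ih]
        rw [List.find?_cons_of_neg (by
          simp only [Bool.and_eq_true, decide_eq_true_eq]
          exact fun h => hlt h.1.2)]
        rw [find?_congr_mem' _ _ t (fun x hx => ?_)]
        rw [Bool.eq_iff_iff]
        simp only [Bool.and_eq_true, decide_eq_true_eq, List.all_cons, Bool.or_eq_true,
          Bool.not_eq_true', List.all_eq_true]
        constructor
        · rintro ⟨⟨hxin, hxlt⟩, hall⟩
          exact ⟨⟨hxin, hxlt⟩, ⟨Or.inr (by omega), hall⟩⟩
        · rintro ⟨⟨hxin, hxlt⟩, ⟨_, hall⟩⟩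
          exact ⟨⟨hxin, hxlt⟩, hall⟩
    · rw [if_neg (by simp only [Bool.and_eq_true]; exact fun h => hin h.1)]
      rw [ih]
      rw [List.find?_cons_of_neg (by
        simp only [Bool.and_eq_true]
        exact fun h => hin h.1.1)]
      rw [find?_congr_mem' _ _ t (fun x hx => ?_)]
      rw [Bool.eq_iff_iff]
      simp only [Bool.and_eq_true, decide_eq_true_eq, List.all_cons, Bool.or_eq_true,
        Bool.not_eq_true', List.all_eq_true]
      constructor
      · rintro ⟨⟨hxin, hxlt⟩, hall⟩
        exact ⟨⟨hxin, hxlt⟩, ⟨Or.inl (Bool.not_eq_true _ ▸ hin), hall⟩⟩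
      · rintro ⟨⟨hxin, hxlt⟩, ⟨_, hall⟩⟩
        exact ⟨⟨hxin, hxlt⟩, hall⟩

theorem translate_deck_name_spec : Claim_equal_translate_deck_name := by
  intro name archetypes _
  unfold Spec_translate_deck_name
  simp only [translate_deck_name, translate_deck_name_alt, PySem.Dict.keys]
  by_cases hg : (name == "" || archetypes.isEmpty) = true
  · rw [if_pos hg, if_pos hg]
  · rw [if_neg hg, if_neg hg]
    cases hget : (PySem.Dict.ofList archetypes).get? (PySem.Str.strip (PySem.Str.lower name)) with
    | some v => rfl
    | none =>
      set nl := PySem.Str.strip (PySem.Str.lower name) with hnl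
      set l := (PySem.Dict.ofList archetypes).items with hl
      rw [fold_best_spec nl l none 0]
      set lens := ((l.map (fun x => x.1)).filter (fun k => PySem.Str.isIn k nl)).map PySem.Str.len with hlens
      set M := PySem.List.maxD lens (fun x => x) 0 with hM
      have hlen_mem : ∀ kv ∈ l, PySem.Str.isIn kv.1 nl = true → PySem.Str.len kv.1 ∈ lens := by
        intro kv hkv hkvin
        rw [hlens]
        exact List.mem_map_of_mem (List.mem_filter.mpr ⟨List.mem_map_of_mem hkv, hkvin⟩)
      have hisMax : ∀ z ∈ lens, z ≤ M := by
        intro z hz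
        have hne : lens ≠ [] := by intro h; rw [h] at hz; cases hz
        rw [hM]
        unfold PySem.List.maxD
        cases hm : PySem.List.max? lens (fun x => x) with
        | none => exact absurd ((PySem.List.max?_eq_none_iff lens (fun x => x)).mp hm) hne
        | some m => exact PySem.List.max?_isMax hm z hz
      by_cases hM0 : M = 0
      · have hnone : l.find? (fun kv =>
            PySem.Str.isIn kv.1 nl && decide (0 < PySem.Str.len kv.1)
            && l.all (fun kv' => !(PySem.Str.isIn kv'.1 nl)
                || decide (PySem.Str.len kv'.1 ≤ PySem.Str.len kv.1))) = none := by
          rw [List.find?_eq_none]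
          intro x hx hQ
          simp only [Bool.and_eq_true, decide_eq_true_eq] at hQ
          have := hisMax _ (hlen_mem x hx hQ.1.1)
          omega
        rw [hnone, if_pos (by rw [beq_iff_eq]; exact hM0)]
      · have hlne : lens ≠ [] := by
          intro h
          rw [hM, h, PySem.List.maxD_nil] at hM0
          exact hM0 rfl
        have hMmem : M ∈ lens := hM ▸ PySem.List.maxD_mem lens (fun x => x) 0 hlne
        have hMpos : 0 < M := by
          obtain ⟨k, hk, hkM⟩ := List.mem_map.mp hMmem
          have h := PySem.Str.len_eq k
          omega
        obtain ⟨k0, hk0f, hk0len⟩ := List.mem_map.mp hMmem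
        obtain ⟨hk0m, hk0in⟩ := List.mem_filter.mp hk0f
        obtain ⟨kv0, hkv0, hkv0fst⟩ := List.mem_map.mp hk0m
        have hMax : ∀ kv ∈ l, PySem.Str.isIn kv.1 nl = true → PySem.Str.len kv.1 ≤ M :=
          fun kv hkv hkvin => hisMax _ (hlen_mem kv hkv hkvin)
        have hcong : l.find? (fun kv =>
            PySem.Str.isIn kv.1 nl && decide (0 < PySem.Str.len kv.1)
            && l.all (fun kv' => !(PySem.Str.isIn kv'.1 nl)
                || decide (PySem.Str.len kv'.1 ≤ PySem.Str.len kv.1)))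
            = l.find? (fun kv => PySem.Str.len kv.1 == M && PySem.Str.isIn kv.1 nl) := by
          refine find?_congr_mem' _ _ l (fun x hx => ?_)
          rw [Bool.eq_iff_iff]
          simp only [Bool.and_eq_true, decide_eq_true_eq, List.all_eq_true, Bool.or_eq_true,
            Bool.not_eq_true', beq_iff_eq]
          constructor
          · rintro ⟨⟨hxin, hx0⟩, hdomx⟩
            have h1 : PySem.Str.len x.1 ≤ M := hMax x hx hxin
            have h2 := hdomx kv0 hkv0
            rw [hkv0fst] at h2
            rcases h2 with h2 | h2
            · rw [h2] at hk0in; cases hk0in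
            · exact ⟨by omega, hxin⟩
          · rintro ⟨hlenM, hxin⟩
            refine ⟨⟨hxin, by omega⟩, fun y hy => ?_⟩
            by_cases hyin : PySem.Str.isIn y.1 nl = true
            · exact Or.inr (by have := hMax y hy hyin; omega)
            · exact Or.inl (Bool.not_eq_true _ ▸ hyin)
        rw [hcong, if_neg (by rw [beq_iff_eq]; exact hM0)]
        cases hf : l.find? (fun kv => PySem.Str.len kv.1 == M && PySem.Str.isIn kv.1 nl) with
        | none => rfl
        | some u => rfl
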